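-- pv_equiv track=rewrite | github.com/Donggyu-Kim1/coding_practice | 프로그래머스/0/120880. 특이한 정렬/특이한 정렬.py | solution
-- ===== SOURCE A (Python) =====
-- def solution(numlist, n):
--     answer = []
--     dis = []
--
--     for i in numlist:
--         dis.append(abs(n - i))
--
--     dis = sorted(dis)
--     re_numlist = sorted(numlist)[::-1]
--     for l in dis:
--         for k in re_numlist:
--             if abs(n - k) == l:
--                 answer.append(k)
--             else:
--                 dis = dis[1:]
--
--     answer2 = []
--     for i in answer:
--         if i not in answer2:
--             answer2.append(i)
--
--     return answer2
-- ===== SOURCE B (Python) =====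
-- def solution(numlist, n):
--     # distinct values, ordered by (distance to n ascending, value descending)
--     return sorted(set(numlist), key=lambda x: (abs(n - x), -x))
-- ===== Notes on version B (the rewrite author's own statement) =====
-- stated objective: faster
-- what changed: A's nested rescan of the value-sorted list for every entry of the sorted distance list, followed by an order-preserving dedup pass, is replaced by a single sort of the distinct values (set) under the key (abs(n-x), -x).
import Mathlib
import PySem

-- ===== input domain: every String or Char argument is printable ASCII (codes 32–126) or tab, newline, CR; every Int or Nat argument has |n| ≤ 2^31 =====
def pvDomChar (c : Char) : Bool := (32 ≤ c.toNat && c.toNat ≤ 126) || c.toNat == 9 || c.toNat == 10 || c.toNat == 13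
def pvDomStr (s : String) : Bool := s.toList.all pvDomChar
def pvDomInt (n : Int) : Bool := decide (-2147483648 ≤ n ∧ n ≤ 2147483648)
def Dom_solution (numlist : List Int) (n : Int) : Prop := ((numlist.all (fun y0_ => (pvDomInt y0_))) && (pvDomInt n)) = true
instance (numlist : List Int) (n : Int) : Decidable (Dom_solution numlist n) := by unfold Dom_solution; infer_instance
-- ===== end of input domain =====

-- B replaces A's nested distance×value rescan plus manual dedup pass by a single key-sort
-- of the distinct values (set + sorted with key (abs(n-x), -x)); return values proved equal.

-- ===== PORT A =====
-- literal transliteration of A: build the distance list, sort it, iterate it against the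
-- value-descending sorted list (threading the 'dis = dis[1:]' reassignment, which never
-- affects the already-started outer iteration), then dedup preserving first occurrences.
def solution (numlist : List Int) (n : Int) : List Int :=
  let answer : List Int := []
  let dis : List Int := numlist.foldl (fun acc i => acc ++ [|n - i|]) []
  let dis := PySem.List.sorted dis (fun x => x) false
  -- sorted(numlist)[::-1]; a [::-1] slice never raises, so slice? is always some here
  let re_numlist := (PySem.List.slice? (PySem.List.sorted numlist (fun x => x) false) none none (-1)).getD []
  let st := dis.foldl (fun (st : List Int × List Int) l =>
      re_numlist.foldl (fun (st : List Int × List Int) k =>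
        if |n - k| == l then (st.1 ++ [k], st.2)
        else (st.1, PySem.List.slice st.2 (some 1) none)) st)
    (answer, dis)
  let answer := st.1
  answer.foldl (fun a2 i => if a2.contains i then a2 else a2 ++ [i]) []

-- ===== PORT B =====
-- sorted(set(numlist), key=lambda x: (abs(n - x), -x)) — the key is injective, so the
-- result does not depend on the set's iteration order
def solution_alt (numlist : List Int) (n : Int) : List Int :=
  PySem.List.sorted2 (PySem.Set.ofList numlist) (fun x => |n - x|) (fun x => -x) false

-- ===== PRECONDITION & SPEC =====
def Spec_solution (numlist : List Int) (n : Int) (out : List Int) : Prop := out = solution_alt numlist n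
instance (numlist : List Int) (n : Int) (out : List Int) : Decidable (Spec_solution numlist n out) := by unfold Spec_solution; infer_instance

-- ===== CLAIM (what is proved, stated in full; the proofs are below) =====
def Claim_equal_solution : Prop := ∀ (numlist : List Int) (n : Int), Dom_solution numlist n → Spec_solution numlist n (solution numlist n)

-- ===== LEMMAS AND PROOFS =====

-- B's sort key, as a single lexicographic key
def pvKey (n x : Int) : Lex (Int × Int) := toLex (|n - x|, -x)

theorem pvKey_lt_iff (n a b : Int) :
    pvKey n a < pvKey n b ↔ (|n - a| < |n - b| ∨ (|n - a| = |n - b| ∧ b < a)) := by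
  simp [pvKey, Prod.Lex.lt_iff]

-- sorted with a two-component Int key is sorted with the corresponding lexicographic key
theorem pvSorted2_eq_sorted_lex (xs : List Int) (k1 k2 : Int → Int) :
    PySem.List.sorted2 xs k1 k2 false
      = PySem.List.sorted xs (fun x => toLex (k1 x, k2 x)) false := by
  rw [PySem.List.sorted_eq_foldl_insertBy]
  show List.foldl _ [] xs = _
  have h : (fun a b => decide (k1 a < k1 b) || (!decide (k1 b < k1 a) && decide (k2 a < k2 b)))
      = (fun a b => decide ((fun x => toLex (k1 x, k2 x)) a < (fun x => toLex (k1 x, k2 x)) b)) := by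
    funext a b
    rcases lt_trichotomy (k1 a) (k1 b) with h1 | h1 | h1
    · simp [Prod.Lex.lt_iff, h1, not_lt_of_gt]
    · simp [Prod.Lex.lt_iff, h1]
    · simp [Prod.Lex.lt_iff, h1, not_lt_of_gt]
  simp only [h]
  rfl

-- A's nested loop + dedup, in closed form
theorem pvSolutionA_eq (numlist : List Int) (n : Int) :
    solution numlist n =
      PySem.Set.ofList
        ((PySem.List.sorted (numlist.map (fun i => |n - i|)) (fun x => x) false).flatMap
          (fun l => ((PySem.List.sorted numlist (fun x => x) false).reverse).filter
            (fun k => |n - k| == l))) := by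
  unfold solution
  simp only [PySem.List.foldl_append_singleton_eq_map, List.nil_append,
    PySem.List.slice?_none_none_neg_one, Option.getD_some]
  set sds := PySem.List.sorted (numlist.map (fun i => |n - i|)) (fun x => x) false with hsds
  set re := (PySem.List.sorted numlist (fun x => x) false).reverse with hre
  -- the inner loop body, split into its two independent components
  have hfun : ∀ (l : Int), (fun (st : List Int × List Int) k =>
        if (|n - k| == l) = true then (st.1 ++ [k], st.2)
        else (st.1, PySem.List.slice st.2 (some 1) none))
      = (fun (st : List Int × List Int) k =>
        ((fun a k => if (|n - k| == l) = true then a ++ [k] else a) st.1 k,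
         (fun d k => if (|n - k| == l) = true then d else PySem.List.slice d (some 1) none) st.2 k)) := by
    intro l; funext st k; by_cases h : (|n - k| == l) = true <;> simp [h]
  have hstep : ∀ (st : List Int × List Int) (l : Int),
      re.foldl (fun (st : List Int × List Int) k =>
        if (|n - k| == l) = true then (st.1 ++ [k], st.2)
        else (st.1, PySem.List.slice st.2 (some 1) none)) st
      = (st.1 ++ re.filter (fun k => |n - k| == l),
         re.foldl (fun d k => if (|n - k| == l) = true then d else PySem.List.slice d (some 1) none) st.2) := by
    intro st l
    rw [hfun l]
    rw [show st = (st.1, st.2) from rfl]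
    rw [PySem.List.foldl_prod_mk (f := fun a k => if (|n - k| == l) = true then a ++ [k] else a)
      (g := fun d k => if (|n - k| == l) = true then d else PySem.List.slice d (some 1) none)]
    rw [PySem.List.foldl_append_if_eq_filter]
  -- the answer component of the nested fold is the concatenation of the blocks
  have hmain : ∀ (ds : List Int) (a d0 : List Int),
      (ds.foldl (fun (st : List Int × List Int) l =>
        re.foldl (fun (st : List Int × List Int) k =>
          if (|n - k| == l) = true then (st.1 ++ [k], st.2)
          else (st.1, PySem.List.slice st.2 (some 1) none)) st) (a, d0)).1
      = a ++ ds.flatMap (fun l => re.filter (fun k => |n - k| == l)) := by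
    intro ds
    induction ds with
    | nil => simp
    | cons l ds ih =>
      intro a d0
      rw [List.foldl_cons, hstep, ih, List.flatMap_cons, List.append_assoc]
  rw [hmain]
  rw [List.nil_append]
  -- the dedup loop is exactly Set.ofList
  rw [PySem.Set.ofList_eq_foldl]
  apply PySem.List.foldl_congr_mem
  intro acc x _
  simp [PySem.Set.add, PySem.Set.contains]

theorem pvOfList_sublist {α : Type} [BEq α] [LawfulBEq α] (xs : List α) :
    (PySem.Set.ofList xs).Sublist xs := by
  induction xs with
  | nil => simp
  | cons x xs ih =>
    rw [PySem.Set.ofList_cons]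
    refine List.Sublist.cons₂ x ?_
    exact List.Sublist.trans (by simp [PySem.Set.discard]) ih

-- master invariant: folding Set.update with the per-distance blocks over an ascending
-- distance list keeps the accumulated set strictly sorted by pvKey
theorem pvMaster (n : Int) (re : List Int) (hre : re.Pairwise (fun a b => b ≤ a)) :
    ∀ (ds : List Int) (S : List Int), ds.Pairwise (· ≤ ·) →
      S.Pairwise (fun a b => pvKey n a < pvKey n b) →
      (∀ y ∈ S, ∀ d ∈ ds, |n - y| ≤ d) →
      (∀ d ∈ ds, (∃ y ∈ S, |n - y| = d) → ∀ z ∈ re.filter (fun x => |n - x| == d), z ∈ S) →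
      (ds.foldl (fun s d => PySem.Set.update s (re.filter (fun x => |n - x| == d))) S).Pairwise
        (fun a b => pvKey n a < pvKey n b) := by
  intro ds
  induction ds with
  | nil => intro S _ hS _ _; simpa using hS
  | cons d ds ih =>
    intro S hds hS h3 h4
    rw [List.foldl_cons]
    set blk := re.filter (fun x => |n - x| == d) with hblk
    have hblkmem : ∀ z ∈ blk, z ∈ re ∧ |n - z| = d := by
      intro z hz
      rw [hblk, List.mem_filter] at hz
      exact ⟨hz.1, by simpa using hz.2⟩
    set tail := (PySem.Set.ofList blk).filter (fun y => !(PySem.Set.contains S y)) with htail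
    have hupd : PySem.Set.update S blk = S ++ tail := PySem.Set.update_eq_append_filter S blk
    have htail_sub : tail.Sublist blk :=
      List.Sublist.trans (List.filter_sublist) (pvOfList_sublist blk)
    have htail_mem : ∀ z ∈ tail, z ∈ blk ∧ z ∉ S := by
      intro z hz
      rw [htail, List.mem_filter] at hz
      refine ⟨(PySem.Set.mem_ofList blk z).mp hz.1, ?_⟩
      have := hz.2
      simp [PySem.Set.contains] at this
      exact this
    have htail_nodup : tail.Nodup := by
      rw [htail]; exact (PySem.Set.nodup_ofList blk).filter _
    -- within a block: strictly decreasing values, all at distance d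
    have htail_pw : tail.Pairwise (fun a b => pvKey n a < pvKey n b) := by
      have hge : tail.Pairwise (fun a b => b ≤ a) :=
        (hre.sublist (List.Sublist.trans htail_sub List.filter_sublist))
      have hne : tail.Pairwise (fun a b => a ≠ b) := htail_nodup
      refine (hge.and hne).imp_of_mem ?_
      intro a b ha hb hab
      rw [pvKey_lt_iff]
      right
      exact ⟨by rw [(hblkmem a (htail_mem a ha).1).2, (hblkmem b (htail_mem b hb).1).2],
        lt_of_le_of_ne hab.1 (fun h => hab.2 h.symm)⟩
    have hSd : ∀ y ∈ S, |n - y| ≤ d := fun y hy => h3 y hy d (List.mem_cons_self ..)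
    -- across blocks: everything already in S has a strictly smaller distance
    have hcross : ∀ a ∈ S, ∀ b ∈ tail, pvKey n a < pvKey n b := by
      intro a ha b hb
      have hbd := (hblkmem b (htail_mem b hb).1).2
      rcases lt_or_eq_of_le (hSd a ha) with h | h
      · rw [pvKey_lt_iff]; left; omega
      · -- some element of S already has distance d ⇒ the whole block is in S, contra b ∉ S
        exact absurd ((h4 d (List.mem_cons_self ..) ⟨a, ha, h⟩) b (htail_mem b hb).1)
          (htail_mem b hb).2
    have hS' : (S ++ tail).Pairwise (fun a b => pvKey n a < pvKey n b) := by
      rw [List.pairwise_append]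
      exact ⟨hS, htail_pw, hcross⟩
    rw [hupd]
    refine ih (S ++ tail) (hds.of_cons) hS' ?_ ?_
    · intro y hy d' hd'
      have hdd' : d ≤ d' := (List.pairwise_cons.mp hds).1 d' hd'
      rcases List.mem_append.mp hy with h | h
      · exact le_trans (hSd y h) hdd'
      · rw [(hblkmem y (htail_mem y h).1).2]; exact hdd'
    · intro d' hd' ⟨y, hy, hyd⟩ z hz
      have hdd' : d ≤ d' := (List.pairwise_cons.mp hds).1 d' hd'
      rcases eq_or_lt_of_le hdd' with h | h
      · -- d' = d : the whole block d is inside S ++ tail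
        subst h
        by_cases hzS : z ∈ S
        · exact List.mem_append_left _ hzS
        · refine List.mem_append_right _ ?_
          rw [htail, List.mem_filter]
          exact ⟨(PySem.Set.mem_ofList blk z).mpr hz, by simp [PySem.Set.contains, hzS]⟩
      · -- d' > d : y must come from S (the new block has distance d < d'), reuse h4
        rcases List.mem_append.mp hy with hyS | hyT
        · exact List.mem_append_left _ ((h4 d' (List.mem_cons_of_mem _ hd') ⟨y, hyS, hyd⟩) z hz)
        · exact absurd hyd (by rw [(hblkmem y (htail_mem y hyT).1).2]; omega)

-- A's closed form is B: same distinct elements, and A's form is strictly pvKey-sorted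
theorem pvGlue (numlist : List Int) (n : Int) :
    PySem.Set.ofList
        ((PySem.List.sorted (numlist.map (fun i => |n - i|)) (fun x => x) false).flatMap
          (fun l => ((PySem.List.sorted numlist (fun x => x) false).reverse).filter
            (fun k => |n - k| == l)))
      = solution_alt numlist n := by
  unfold solution_alt
  rw [pvSorted2_eq_sorted_lex]
  set sds := PySem.List.sorted (numlist.map (fun i => |n - i|)) (fun x => x) false with hsds
  set re := (PySem.List.sorted numlist (fun x => x) false).reverse with hre
  set ys := PySem.Set.ofList (sds.flatMap (fun l => re.filter (fun k => |n - k| == l))) with hys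
  have hrepw : re.Pairwise (fun a b => b ≤ a) := by
    rw [hre, List.pairwise_reverse]
    have := PySem.List.sorted_pairwise numlist (fun x => x)
    simpa using this
  have hdspw : sds.Pairwise (· ≤ ·) := by
    have := PySem.List.sorted_pairwise (numlist.map (fun i => |n - i|)) (fun x => x)
    simpa using this
  -- ys as the fold of Set.update over sds
  have hfold : ys = sds.foldl (fun s d => PySem.Set.update s (re.filter (fun x => |n - x| == d))) [] := by
    rw [hys, PySem.Set.ofList_eq_foldl, List.foldl_flatMap]
    refine PySem.List.foldl_congr_mem _ _ _ _ ?_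
    intro acc x _
    exact (PySem.Set.update_eq_foldl acc _).symm
  have hpw : ys.Pairwise (fun a b => pvKey n a < pvKey n b) := by
    rw [hfold]
    exact pvMaster n re hrepw sds [] hdspw (by simp) (by simp) (by simp)
  have hperm : ys.Perm (PySem.Set.ofList numlist) := by
    rw [List.perm_ext_iff_of_nodup (PySem.Set.nodup_ofList _) (PySem.Set.nodup_ofList _)]
    intro a
    simp only [PySem.Set.mem_ofList, List.mem_flatMap, List.mem_filter, hre, hsds,
      PySem.List.mem_sorted, List.mem_reverse, List.mem_map, beq_iff_eq]
    constructor
    · rintro ⟨l, _, ha, _⟩; exact ha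
    · intro ha
      exact ⟨|n - a|, ⟨a, ha, rfl⟩, ha, rfl⟩
  exact (PySem.List.sorted_eq_of_perm_of_pairwise_lt _ ys (fun x => toLex (|n - x|, -x)) hperm
    (by simpa [pvKey] using hpw)).symm

-- ===== VERDICT (by name: the statement is the Claim_ definition above) =====
theorem solution_spec : Claim_equal_solution := by
  intro numlist n _
  unfold Spec_solution
  rw [pvSolutionA_eq, pvGlue]
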